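-- pv_equiv track=rewrite | github.com/chrisbroski/cumulative-dice | diceprob.py | __dictSumComb
-- ===== SOURCE A (Python) =====
-- def __dictSumComb(bunchOfDice, maxCombs):
--     """
--         Returns a dict of totals and the number of times they occur.
--         Optimized: added dieLengths and eachDie vars, integer division
--     """
--
--     dictComb = {}
--     dieLengths = [len(x) for x in bunchOfDice]
--     eachDie = range(len(bunchOfDice))
--
--     for ii in range(maxCombs[0]):
--         sumComb = 0
--         for iDie in eachDie:
--             sumComb += bunchOfDice[iDie][ii//maxCombs[iDie+1] % dieLengths[iDie]]
--
--         if sumComb in dictComb: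
--             dictComb[sumComb] += 1
--         else:
--             dictComb[sumComb] = 1
--
--     return dictComb
-- ===== SOURCE B (Python) =====
-- def __dictSumComb(bunchOfDice, maxCombs):
--     """Same totals-to-counts dict, built die-by-die: each die's value stream over
--     the combination index is periodic, so we precompute one period per die and
--     tile it across a sums array instead of recomputing every die's mixed-radix
--     digit for every combination."""
--     n = maxCombs[0]
--     if n <= 0:
--         return {}
--     sums = [0] * n
--     for i, die in enumerate(bunchOfDice):
--         s = maxCombs[i + 1]
--         L = len(die)
--         period = abs(s) * L
--         pattern = [die[(t // s) % L] for t in range(min(period, n))]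
--         sums = [acc + pattern[j % period] for j, acc in enumerate(sums)]
--     counts = {}
--     for total in sums:
--         counts[total] = counts.get(total, 0) + 1
--     return counts
-- ===== Notes on version B (the rewrite author's own statement) =====
-- stated objective: alternative
-- what changed: A enumerates every combination index and recomputes each die's mixed-radix digit per index; B instead makes one pass per die, precomputing one period of that die's value stream and tiling it across a sums array, then counts the sums with a get-based counter dict.
import Mathlib
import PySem

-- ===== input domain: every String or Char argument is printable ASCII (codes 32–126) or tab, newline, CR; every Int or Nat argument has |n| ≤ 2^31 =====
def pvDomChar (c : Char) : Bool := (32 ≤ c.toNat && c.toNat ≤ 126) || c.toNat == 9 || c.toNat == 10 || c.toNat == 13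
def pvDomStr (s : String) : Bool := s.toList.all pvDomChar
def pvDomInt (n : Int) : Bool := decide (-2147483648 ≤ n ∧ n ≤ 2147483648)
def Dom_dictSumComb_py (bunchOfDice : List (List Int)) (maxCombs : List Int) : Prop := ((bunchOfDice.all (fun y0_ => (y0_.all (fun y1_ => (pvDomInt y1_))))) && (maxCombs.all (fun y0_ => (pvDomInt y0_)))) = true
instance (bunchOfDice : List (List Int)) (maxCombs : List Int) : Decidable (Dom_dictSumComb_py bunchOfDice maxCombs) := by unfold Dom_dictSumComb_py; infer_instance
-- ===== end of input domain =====

-- B replaces A's per-combination recomputation of every die's mixed-radix digit by a per-die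
-- pass: each die's value stream over the combination index is periodic, so B precomputes one
-- period per die and tiles it across a sums array, then counts (objective: alternative).

-- ===== PORT A =====
def dictSumComb_py (bunchOfDice : List (List Int)) (maxCombs : List Int) : List (Int × Int) :=
  let dieLengths : List Int := bunchOfDice.map (fun x => (x.length : Int))
  ((PySem.List.pyRange 0 (PySem.List.pyGetD maxCombs 0 0) 1).foldl
    (fun dictComb ii =>
      let sumComb : Int :=
        (PySem.List.pyRange 0 (bunchOfDice.length : Int) 1).foldl
          (fun acc iDie =>
            acc + PySem.List.pyGetD (PySem.List.pyGetD bunchOfDice iDie [])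
              (PySem.Int.mod
                (PySem.Int.floordiv ii (PySem.List.pyGetD maxCombs (iDie + 1) 0))
                (PySem.List.pyGetD dieLengths iDie 0)) 0) 0
      match PySem.Dict.get? dictComb sumComb with
      | some v => PySem.Dict.insert dictComb sumComb (v + 1)
      | none => PySem.Dict.insert dictComb sumComb (1 : Int))
    (PySem.Dict.empty : PySem.Dict Int Int)).items

-- ===== PORT B =====
def dictSumComb_py_alt (bunchOfDice : List (List Int)) (maxCombs : List Int) : List (Int × Int) :=
  let n := PySem.List.pyGetD maxCombs 0 0
  if n ≤ 0 then (PySem.Dict.empty : PySem.Dict Int Int).items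
  else
    let sums : List Int :=
      (PySem.List.enumerate bunchOfDice 0).foldl
        (fun sums p =>
          let s := PySem.List.pyGetD maxCombs (p.1 + 1) 0
          let L : Int := (p.2.length : Int)
          let period := |s| * L
          let pattern : List Int :=
            (PySem.List.pyRange 0 (min period n) 1).map
              (fun t => PySem.List.pyGetD p.2
                (PySem.Int.mod (PySem.Int.floordiv t s) L) 0)
          (PySem.List.enumerate sums 0).map
            (fun q => q.2 + PySem.List.pyGetD pattern (PySem.Int.mod q.1 period) 0))
        (List.replicate n.toNat (0 : Int))
    (sums.foldl
      (fun counts t => PySem.Dict.insert counts t (PySem.Dict.getD counts t 0 + 1))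
      PySem.Dict.empty).items

-- ===== PRECONDITION & SPEC =====
-- Pre_ excludes exactly the inputs on which the Python A raises: an empty maxCombs
-- (IndexError on maxCombs[0]), and — when the loop runs at all (maxCombs[0] ≥ 1) — a maxCombs
-- shorter than len(bunchOfDice)+1 (IndexError), an empty die (modulo by zero) or a zero among
-- the used strides maxCombs[1..len(bunchOfDice)] (ZeroDivisionError).
def Pre_dictSumComb_py (bunchOfDice : List (List Int)) (maxCombs : List Int) : Prop :=
  maxCombs ≠ [] ∧
    (1 ≤ maxCombs.headD 0 →
      (bunchOfDice.length ≤ maxCombs.tail.length ∧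
       (∀ d ∈ bunchOfDice, d ≠ []) ∧
       (∀ s ∈ maxCombs.tail.take bunchOfDice.length, s ≠ 0)))
instance (bunchOfDice : List (List Int)) (maxCombs : List Int) : Decidable (Pre_dictSumComb_py bunchOfDice maxCombs) := by unfold Pre_dictSumComb_py; infer_instance

def pvWitness_dictSumComb_py : List (List Int) × List Int := ([[1, 2], [1, 2, 3]], [6, 3, 1])

def Spec_dictSumComb_py (bunchOfDice : List (List Int)) (maxCombs : List Int) (out : List (Int × Int)) : Prop := out = dictSumComb_py_alt bunchOfDice maxCombs
instance (bunchOfDice : List (List Int)) (maxCombs : List Int) (out : List (Int × Int)) : Decidable (Spec_dictSumComb_py bunchOfDice maxCombs out) := by unfold Spec_dictSumComb_py; infer_instance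

-- ===== CLAIM (what is proved, stated in full; the proofs are below) =====
def Claim_equal_dictSumComb_py : Prop := ∀ (bunchOfDice : List (List Int)) (maxCombs : List Int), Dom_dictSumComb_py bunchOfDice maxCombs → Pre_dictSumComb_py bunchOfDice maxCombs → Spec_dictSumComb_py bunchOfDice maxCombs (dictSumComb_py bunchOfDice maxCombs)

-- ===== LEMMAS AND PROOFS =====

-- the contribution of the enumerated dice `pairs` to combination index `ii`
def pvContrib (m : List Int) (pairs : List (Int × List Int)) (ii : Int) : Int :=
  pairs.foldl
    (fun acc p =>
      acc + PySem.List.pyGetD p.2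
        (PySem.Int.mod (PySem.Int.floordiv ii (PySem.List.pyGetD m (p.1 + 1) 0))
          ((p.2.length : Int))) 0) 0

-- the counting step shared by both ports
def pvCount (d : PySem.Dict Int Int) (t : Int) : PySem.Dict Int Int :=
  PySem.Dict.insert d t (PySem.Dict.getD d t 0 + 1)

lemma pvCountA_eq (d : PySem.Dict Int Int) (t : Int) :
    (match PySem.Dict.get? d t with
     | some v => PySem.Dict.insert d t (v + 1)
     | none => PySem.Dict.insert d t (1 : Int)) = pvCount d t := by
  unfold pvCount
  rcases h : PySem.Dict.get? d t with _ | v <;>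
    simp [PySem.Dict.getD_eq_get?_getD, h]

-- A's inner loop computes pvContrib
lemma pvA_inner (bunchOfDice : List (List Int)) (maxCombs : List Int) (ii : Int) :
    (PySem.List.pyRange 0 (bunchOfDice.length : Int) 1).foldl
      (fun acc iDie =>
        acc + PySem.List.pyGetD (PySem.List.pyGetD bunchOfDice iDie [])
          (PySem.Int.mod
            (PySem.Int.floordiv ii (PySem.List.pyGetD maxCombs (iDie + 1) 0))
            (PySem.List.pyGetD (bunchOfDice.map (fun x => (x.length : Int))) iDie 0)) 0) 0
    = pvContrib maxCombs (PySem.List.enumerate bunchOfDice 0) ii := by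
  unfold pvContrib
  rw [PySem.List.enumerate_eq_map_pyRange bunchOfDice ([] : List Int), List.foldl_map]
  have hlen : PySem.List.len bunchOfDice = (bunchOfDice.length : Int) := by
    simp [PySem.List.len_eq]
  rw [hlen]
  apply PySem.List.foldl_congr_mem
  intro acc j hj
  have h := PySem.List.pyGetD_map (fun x : List Int => (x.length : Int)) bunchOfDice j []
  simp only [List.length_nil, Nat.cast_zero] at h
  rw [h]

lemma pvContrib_cons (m : List Int) (p : Int × List Int) (ps : List (Int × List Int)) (ii : Int) :
    pvContrib m (p :: ps) ii
      = PySem.List.pyGetD p.2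
          (PySem.Int.mod (PySem.Int.floordiv ii (PySem.List.pyGetD m (p.1 + 1) 0))
            ((p.2.length : Int))) 0 + pvContrib m ps ii := by
  unfold pvContrib
  rw [List.foldl_cons, PySem.List.foldl_add, PySem.List.foldl_add]
  ring

-- mixed-radix digit of j is unchanged by reducing j modulo the die's period |s|·L
lemma pvDigit_eq (s L j : Int) (hs : s ≠ 0) :
    (Int.fdiv (j % (|s| * L)) s) % L = (Int.fdiv j s) % L := by
  set P : Int := |s| * L with hPdef
  have hj : j % P + P * (j / P) = j := Int.emod_add_mul_ediv j P
  rcases lt_or_gt_of_ne hs with hneg | hpos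
  · have hP : P = -(s * L) := by rw [hPdef, abs_of_neg hneg]; ring
    have hc : j = j % P + (-(j / P) * L) * s := by
      linear_combination -hj + (j / P) * hP
    have h1 : Int.fdiv j s = Int.fdiv (j % P) s + (-(j / P) * L) := by
      conv_lhs => rw [hc]
      exact Int.add_mul_fdiv_right _ _ hs
    rw [h1, Int.add_mul_emod_self_right]
  · have hP : P = s * L := by rw [hPdef, abs_of_pos hpos]
    have hc : j = j % P + (j / P * L) * s := by
      linear_combination -hj + (j / P) * hP
    have h1 : Int.fdiv j s = Int.fdiv (j % P) s + (j / P * L) := by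
      conv_lhs => rw [hc]
      exact Int.add_mul_fdiv_right _ _ hs
    rw [h1, Int.add_mul_emod_self_right]

-- crux: the tiled pattern lookup equals the direct digit lookup
lemma pvPattern_eq (die : List Int) (s n j : Int) (hs : s ≠ 0) (hL : die ≠ [])
    (hj0 : 0 ≤ j) (hjn : j < n) :
    PySem.List.pyGetD
      ((PySem.List.pyRange 0 (min (|s| * (die.length : Int)) n) 1).map
        (fun t => PySem.List.pyGetD die
          (PySem.Int.mod (PySem.Int.floordiv t s) (die.length : Int)) 0))
      (PySem.Int.mod j (|s| * (die.length : Int))) 0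
    = PySem.List.pyGetD die
        (PySem.Int.mod (PySem.Int.floordiv j s) (die.length : Int)) 0 := by
  have hL0 : 0 < (die.length : Int) := by
    exact_mod_cast Nat.pos_of_ne_zero (fun h => hL (List.eq_nil_of_length_eq_zero h))
  have hP0 : 0 < |s| * (die.length : Int) := mul_pos (abs_pos.mpr hs) hL0
  rw [PySem.Int.mod_eq_emod_of_pos hP0]
  have hr0 : 0 ≤ j % (|s| * (die.length : Int)) := Int.emod_nonneg j (by omega)
  have hrP : j % (|s| * (die.length : Int)) < |s| * (die.length : Int) :=
    Int.emod_lt_of_pos j hP0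
  have hrj : j % (|s| * (die.length : Int)) ≤ j := by
    rcases lt_or_gt_of_ne (ne_of_lt hP0).symm with h | h
    · omega
    · rcases Int.lt_or_le j (|s| * (die.length : Int)) with h2 | h2
      · rw [Int.emod_eq_of_lt hj0 h2]
      · omega
  rw [PySem.List.pyGetD_map_pyRange_of_nonneg _ _ _ _ hr0 (lt_min hrP (by omega))]
  congr 1
  show PySem.Int.mod (Int.fdiv (j % (|s| * (die.length : Int))) s) (die.length : Int)
      = PySem.Int.mod (Int.fdiv j s) (die.length : Int)
  rw [PySem.Int.mod_eq_emod_of_pos hL0, PySem.Int.mod_eq_emod_of_pos hL0]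
  exact pvDigit_eq s (die.length : Int) j hs

-- B's per-die pass maps pointwise over the sums array
lemma pvStep_eq (die : List Int) (s n : Int) (g : Int → Int) (hs : s ≠ 0) (hL : die ≠ []) :
    (PySem.List.enumerate ((PySem.List.pyRange 0 n 1).map g) 0).map
      (fun q => q.2 + PySem.List.pyGetD
        ((PySem.List.pyRange 0 (min (|s| * (die.length : Int)) n) 1).map
          (fun t => PySem.List.pyGetD die
            (PySem.Int.mod (PySem.Int.floordiv t s) (die.length : Int)) 0))
        (PySem.Int.mod q.1 (|s| * (die.length : Int))) 0)
    = (PySem.List.pyRange 0 n 1).map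
        (fun ii => g ii + PySem.List.pyGetD die
          (PySem.Int.mod (PySem.Int.floordiv ii s) (die.length : Int)) 0) := by
  rw [PySem.List.enumerate_eq_map_pyRange ((PySem.List.pyRange 0 n 1).map g) (0 : Int)]
  rw [List.map_map]
  have hlen : PySem.List.len ((PySem.List.pyRange 0 n 1).map g) = max n 0 := by
    simp [PySem.List.len_eq, PySem.List.length_pyRange_one]
  rw [hlen]
  have hrange : PySem.List.pyRange 0 (max n 0) 1 = PySem.List.pyRange 0 n 1 := by
    rcases le_or_gt n 0 with h | h
    · rw [max_eq_right h, PySem.List.pyRange_one_eq_nil le_rfl, PySem.List.pyRange_one_eq_nil h]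
    · rw [max_eq_left (le_of_lt h)]
  rw [hrange]
  apply List.map_congr_left
  intro j hj
  rw [PySem.List.mem_pyRange_one] at hj
  simp only [Function.comp]
  rw [PySem.List.pyGetD_map_pyRange_of_nonneg g n j 0 hj.1 hj.2]
  rw [pvPattern_eq die s n j hs hL hj.1 hj.2]

-- B's fold over the enumerated dice builds the per-index sums array
lemma pvFold_dice (maxCombs : List Int) (n : Int) :
    ∀ (dice : List (List Int)) (i0 : Int) (g : Int → Int),
      (∀ d ∈ dice, d ≠ []) →
      (∀ k : Nat, k < dice.length → PySem.List.pyGetD maxCombs (i0 + k + 1) 0 ≠ 0) →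
      (PySem.List.enumerate dice i0).foldl
        (fun sums p =>
          let s := PySem.List.pyGetD maxCombs (p.1 + 1) 0
          let L : Int := (p.2.length : Int)
          let period := |s| * L
          let pattern : List Int :=
            (PySem.List.pyRange 0 (min period n) 1).map
              (fun t => PySem.List.pyGetD p.2
                (PySem.Int.mod (PySem.Int.floordiv t s) L) 0)
          (PySem.List.enumerate sums 0).map
            (fun q => q.2 + PySem.List.pyGetD pattern (PySem.Int.mod q.1 period) 0))
        ((PySem.List.pyRange 0 n 1).map g)
      = (PySem.List.pyRange 0 n 1).map
          (fun ii => g ii + pvContrib maxCombs (PySem.List.enumerate dice i0) ii) := by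
  intro dice
  induction dice with
  | nil =>
      intro i0 g _ _
      simp [PySem.List.enumerate_nil, pvContrib]
  | cons d ds ih =>
      intro i0 g hne hs
      rw [PySem.List.enumerate_cons, List.foldl_cons]
      have hs0 : PySem.List.pyGetD maxCombs (i0 + 1) 0 ≠ 0 := by
        have := hs 0 (by simp)
        simpa using this
      have hd : d ≠ [] := hne d List.mem_cons_self
      rw [pvStep_eq d _ n g hs0 hd]
      rw [ih (i0 + 1)
        (fun ii => g ii + PySem.List.pyGetD d
          (PySem.Int.mod (PySem.Int.floordiv ii (PySem.List.pyGetD maxCombs (i0 + 1) 0))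
            ((d.length : Int))) 0)
        (fun x hx => hne x (List.mem_cons_of_mem d hx))
        (fun k hk => by
          have := hs (k + 1) (by simpa using Nat.succ_lt_succ hk)
          have harith : i0 + ((k : Int) + 1) + 1 = i0 + 1 + (k : Int) + 1 := by ring
          simpa [harith] using this)]
      apply List.map_congr_left
      intro j hj
      rw [pvContrib_cons]
      ring

-- ===== VERDICT (by name: the statement is the Claim_ definition above) =====
theorem dictSumComb_py_spec : Claim_equal_dictSumComb_py := by
  intro bunchOfDice maxCombs hdom hpre
  obtain ⟨hne0, hcond⟩ := hpre
  rcases maxCombs with _ | ⟨m0, rest⟩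
  · exact absurd rfl hne0
  unfold Spec_dictSumComb_py dictSumComb_py dictSumComb_py_alt
  simp only [PySem.List.pyGetD_zero_cons]
  rcases le_or_gt m0 0 with hm | hm
  · rw [if_pos hm, PySem.List.pyRange_one_eq_nil hm, List.foldl_nil]
  · obtain ⟨hlen, hne, hsz⟩ := hcond (by simpa using hm)
    rw [if_neg (by omega)]
    -- A's side: rewrite the dict step and inner sum
    have hfunA : (fun (dictComb : PySem.Dict Int Int) (ii : Int) =>
        let sumComb : Int :=
          (PySem.List.pyRange 0 (bunchOfDice.length : Int) 1).foldl
            (fun acc iDie =>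
              acc + PySem.List.pyGetD (PySem.List.pyGetD bunchOfDice iDie [])
                (PySem.Int.mod
                  (PySem.Int.floordiv ii (PySem.List.pyGetD (m0 :: rest) (iDie + 1) 0))
                  (PySem.List.pyGetD (bunchOfDice.map (fun x => (x.length : Int))) iDie 0)) 0) 0
        match PySem.Dict.get? dictComb sumComb with
        | some v => PySem.Dict.insert dictComb sumComb (v + 1)
        | none => PySem.Dict.insert dictComb sumComb (1 : Int))
        = fun dictComb ii =>
            pvCount dictComb (pvContrib (m0 :: rest) (PySem.List.enumerate bunchOfDice 0) ii) := by
      funext dc ii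
      simp only []
      rw [pvA_inner bunchOfDice (m0 :: rest) ii, pvCountA_eq]
    rw [hfunA]
    -- B's side: the replicate seed is a constant-0 comprehension, then fold the dice
    have hsK : ∀ k : Nat, k < bunchOfDice.length →
        PySem.List.pyGetD (m0 :: rest) ((0 : Int) + k + 1) 0 ≠ 0 := by
      intro k hk
      have hcast : ((0 : Int) + k + 1) = ((k + 1 : Nat) : Int) := by push_cast; ring
      rw [hcast, PySem.List.pyGetD_natCast, List.getD_cons_succ]
      have hk' : k < rest.length := lt_of_lt_of_le hk hlen
      rw [List.getD_eq_getElem rest 0 hk']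
      apply hsz
      have hkt : k < (rest.take bunchOfDice.length).length := by
        simp [List.length_take]; omega
      have := List.getElem_take (xs := rest) (j := bunchOfDice.length) (i := k) (h := hkt)
      rw [← this]
      exact List.getElem_mem hkt
    have hrep : List.replicate m0.toNat (0 : Int)
        = (PySem.List.pyRange 0 m0 1).map (fun _ => (0 : Int)) := by
      rw [List.map_const', PySem.List.length_pyRange_one]
      congr 1
      omega
    rw [hrep, pvFold_dice (m0 :: rest) m0 bunchOfDice 0 (fun _ => (0 : Int)) hne hsK]
    have : (fun ii => (0 : Int) + pvContrib (m0 :: rest) (PySem.List.enumerate bunchOfDice 0) ii)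
        = fun ii => pvContrib (m0 :: rest) (PySem.List.enumerate bunchOfDice 0) ii := by
      funext ii; ring
    rw [this, ← List.foldl_map]
    rfl
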